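-- pv_equiv track=rewrite | github.com/11000db/qa-agent-mvp | app/validate_test_case.py | validate_duplicate_traceability_items
-- ===== SOURCE A (Python) =====
-- def normalize_text(text: str) -> str:
--     return " ".join(text.strip().lower().split())
--
-- def validate_duplicate_traceability_items(data: dict) -> list:
--     duplicates = []
--     seen = set()
--
--     traceability_items = data.get("traceability", [])
--
--     if not isinstance(traceability_items, list):
--         return duplicates
--
--     for item in traceability_items:
--         if not isinstance(item, str):
--             continue
--
--         normalized_item = normalize_text(item)
--
--         if normalized_item in seen:
--             duplicates.append(item)
--         else:
--             seen.add(normalized_item)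
--
--     return duplicates
-- ===== SOURCE B (Python) =====
-- def normalize_text(text: str) -> str:
--     return " ".join(text.strip().lower().split())
--
-- def validate_duplicate_traceability_items(data: dict) -> list:
--     traceability_items = data.get("traceability", [])
--
--     if not isinstance(traceability_items, list):
--         return []
--
--     # pass 1: first occurrence index of each normalized form
--     first = {}
--     for i, item in enumerate(traceability_items):
--         if isinstance(item, str):
--             n = normalize_text(item)
--             if n not in first:
--                 first[n] = i
--
--     # pass 2: an item is a duplicate iff its norm first occurred strictly earlier
--     return [item for i, item in enumerate(traceability_items)
--             if isinstance(item, str) and first[normalize_text(item)] < i]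
-- ===== Notes on version B (the rewrite author's own statement) =====
-- stated objective: alternative
-- what changed: Replaces the single stateful seen-set loop by two separate passes: pass 1 builds an index of the FIRST occurrence position of every normalized form, pass 2 selects the items whose normalized form's first-occurrence index is strictly less than their own position.
import Mathlib
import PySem

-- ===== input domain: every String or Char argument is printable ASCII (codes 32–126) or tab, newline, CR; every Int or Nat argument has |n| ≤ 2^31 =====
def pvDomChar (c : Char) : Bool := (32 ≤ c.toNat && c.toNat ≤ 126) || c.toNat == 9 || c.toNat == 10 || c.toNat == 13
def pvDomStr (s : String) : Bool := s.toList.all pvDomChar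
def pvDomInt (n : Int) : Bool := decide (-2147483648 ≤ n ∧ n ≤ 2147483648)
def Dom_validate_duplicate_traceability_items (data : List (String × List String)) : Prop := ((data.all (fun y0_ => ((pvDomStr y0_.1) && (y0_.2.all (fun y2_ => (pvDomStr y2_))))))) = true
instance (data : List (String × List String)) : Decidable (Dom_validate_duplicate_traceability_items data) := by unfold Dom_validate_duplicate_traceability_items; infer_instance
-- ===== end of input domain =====

-- B replaces A's single stateful seen-set loop by two passes: pass 1 records each
-- normalized form's FIRST occurrence index in a dict, pass 2 keeps the items whose
-- norm first occurred strictly earlier; alternative decomposition, same cost.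


-- ===== PORT A =====
-- " ".join(text.strip().lower().split())
def normalize_text (text : String) : String :=
  PySem.Str.join " " (PySem.Str.split₀ (PySem.Str.lower (PySem.Str.strip text)))

-- the body of A's for-loop: state = (duplicates, seen)
def pvAStep (st : List String × PySem.Set String) (item : String) : List String × PySem.Set String :=
  let normalized_item := normalize_text item
  if PySem.Set.contains st.2 normalized_item then (st.1 ++ [item], st.2)
  else (st.1, PySem.Set.add st.2 normalized_item)

-- Under the type convention data : dict[str, list[str]], so `traceability_items` is
-- always a list and every item a str: the isinstance guards are vacuously true and
-- the early `return duplicates` branch is unreachable; otherwise a literal port.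
def validate_duplicate_traceability_items (data : List (String × List String)) : List String :=
  let traceability_items := (PySem.Dict.mk data).getD "traceability" []
  (traceability_items.foldl pvAStep ([], PySem.Set.empty)).1

-- ===== PORT B =====
-- pass-1 loop body of Source B: if n not in first: first[n] = i
def pvBStep (first : PySem.Dict String Int) (p : Int × String) : PySem.Dict String Int :=
  if first.contains (normalize_text p.2) then first
  else first.insert (normalize_text p.2) p.1

-- pass 1: first[normalize(item)] = first occurrence index
def pvFirstPass (items : List String) : PySem.Dict String Int :=
  (PySem.List.enumerate items 0).foldl pvBStep PySem.Dict.empty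

-- literal port of Source B (same type-convention note: isinstance guards vacuous);
-- Python's first[n] lookup always finds its key after pass 1, so getD 0 is exact.
def validate_duplicate_traceability_items_alt (data : List (String × List String)) : List String :=
  let traceability_items := (PySem.Dict.mk data).getD "traceability" []
  let first := pvFirstPass traceability_items
  (PySem.List.enumerate traceability_items 0).filterMap (fun p =>
    if first.getD (normalize_text p.2) 0 < p.1 then some p.2 else none)

-- ===== PRECONDITION & SPEC =====
def Spec_validate_duplicate_traceability_items (data : List (String × List String)) (out : List String) : Prop := out = validate_duplicate_traceability_items_alt data
instance (data : List (String × List String)) (out : List String) : Decidable (Spec_validate_duplicate_traceability_items data out) := by unfold Spec_validate_duplicate_traceability_items; infer_instance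

-- ===== CLAIM (what is proved, stated in full; the proofs are below) =====
def Claim_equal_validate_duplicate_traceability_items : Prop := ∀ (data : List (String × List String)), Dom_validate_duplicate_traceability_items data → Spec_validate_duplicate_traceability_items data (validate_duplicate_traceability_items data)

-- ===== LEMMAS AND PROOFS =====

-- common reference shape: duplicates of xs given the already-seen normalized forms P
def pvDups (P : List String) : List String → List String
  | [] => []
  | x :: xs =>
      if normalize_text x ∈ P then x :: pvDups (P ++ [normalize_text x]) xs
      else pvDups (P ++ [normalize_text x]) xs

-- A's fold computes pvDups, for any seen-set membership-equivalent to P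
theorem pvA_eq_dups (xs : List String) : ∀ (acc : List String) (s : PySem.Set String)
    (P : List String), (∀ m, m ∈ s ↔ m ∈ P) →
    (xs.foldl pvAStep (acc, s)).1 = acc ++ pvDups P xs := by
  induction xs with
  | nil => intro acc s P _; simp [pvDups]
  | cons x xs ih =>
      intro acc s P hs
      simp only [List.foldl_cons, pvAStep, pvDups,
        PySem.Set.contains_eq_listContains, List.contains_eq_mem]
      by_cases hmem : normalize_text x ∈ P
      · rw [if_pos (by simp [(hs _).mpr hmem]), if_pos hmem]
        rw [ih (acc ++ [x]) s (P ++ [normalize_text x])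
              (by intro m; rw [hs m]; constructor
                  · exact fun h => List.mem_append_left _ h
                  · intro h; rcases List.mem_append.mp h with h | h
                    · exact h
                    · simp only [List.mem_singleton] at h; exact h ▸ hmem)]
        simp
      · rw [if_neg (by simp; exact fun h => hmem ((hs _).mp h)), if_neg hmem]
        exact ih acc _ _ (by intro m; simp [PySem.Set.mem_add, hs m])

-- first index ≥ k at which an element of xs normalizes to n
def pvFirstIdx? (n : String) : List String → Int → Option Int
  | [], _ => none
  | x :: xs, k => if normalize_text x = n then some k else pvFirstIdx? n xs (k + 1)

-- pass 1's fold looks up as: whatever was already stored, else the first index in xs from k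
theorem pvFold_get? (xs : List String) : ∀ (k : Int) (d : PySem.Dict String Int) (n : String),
    ((PySem.List.enumerate xs k).foldl pvBStep d).get? n
      = (d.get? n).orElse (fun _ => pvFirstIdx? n xs k) := by
  induction xs with
  | nil => intro k d n; simp [PySem.List.enumerate, pvFirstIdx?]
  | cons x xs ih =>
      intro k d n
      rw [PySem.List.enumerate_cons, List.foldl_cons]
      by_cases hn : normalize_text x = n
      · subst hn
        by_cases hc : d.contains (normalize_text x) = true
        · simp only [pvBStep, hc, if_true]
          rw [ih]
          rw [PySem.Dict.contains_eq_isSome_get?] at hc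
          cases hg : d.get? (normalize_text x) with
          | none => rw [hg] at hc; simp at hc
          | some v => simp [Option.orElse]
        · simp only [Bool.not_eq_true] at hc
          simp only [pvBStep, hc, Bool.false_eq_true, if_false]
          have hnone : d.get? (normalize_text x) = none := by
            rw [PySem.Dict.contains_eq_isSome_get?] at hc
            cases hg : d.get? (normalize_text x) with
            | none => rfl
            | some v => rw [hg] at hc; simp at hc
          rw [ih, PySem.Dict.get?_insert_self, hnone]
          simp [pvFirstIdx?, Option.orElse]
      · have hstep : (pvBStep d (k, x)).get? n = d.get? n := by
          simp only [pvBStep]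
          split
          · rfl
          · exact PySem.Dict.get?_insert_of_ne _ _ (fun h => hn h.symm)
        rw [ih, hstep]
        simp [pvFirstIdx?, hn]

-- the first index of (normalize x) in pre ++ x :: xs is < k + |pre| iff it occurs in pre
theorem pvFirstIdx_lt_iff (x : String) (xs : List String) : ∀ (pre : List String) (k : Int),
    ((pvFirstIdx? (normalize_text x) (pre ++ x :: xs) k).getD 0 < k + (pre.length : Int))
      ↔ normalize_text x ∈ pre.map normalize_text := by
  intro pre
  induction pre with
  | nil =>
      intro k
      simp [pvFirstIdx?]
  | cons p pre ih =>
      intro k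
      by_cases hp : normalize_text p = normalize_text x
      · simp only [List.cons_append, pvFirstIdx?, if_pos hp, Option.getD_some, List.map_cons]
        constructor
        · intro _
          rw [← hp]
          exact List.mem_cons_self
        · intro _
          simp only [List.length_cons]
          push_cast
          omega
      · simp only [List.cons_append, pvFirstIdx?, if_neg hp, List.map_cons, List.mem_cons]
        have hl : k + (((p :: pre).length : Nat) : Int) = (k + 1) + (pre.length : Int) := by
          simp only [List.length_cons]; push_cast; ring
        rw [hl, ih (k + 1)]
        constructor
        · exact Or.inr
        · rintro (h | h)
          · exact absurd h.symm hp
          · exact h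

-- B's second pass over the tail xs of full = pre ++ xs computes pvDups of pre's norms
theorem pvB_eq_dups (full : List String) : ∀ (xs pre : List String), full = pre ++ xs →
    (PySem.List.enumerate xs (pre.length : Int)).filterMap (fun p =>
      if (pvFirstPass full).getD (normalize_text p.2) 0 < p.1 then some p.2 else none)
    = pvDups (pre.map normalize_text) xs := by
  intro xs
  induction xs with
  | nil => intro pre _; simp [PySem.List.enumerate, pvDups]
  | cons x xs ih =>
      intro pre hfull
      rw [PySem.List.enumerate_cons, List.filterMap_cons]
      have hget : (pvFirstPass full).getD (normalize_text x) 0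
          = (pvFirstIdx? (normalize_text x) full 0).getD 0 := by
        rw [PySem.Dict.getD_eq_get?_getD]
        unfold pvFirstPass
        rw [pvFold_get? full 0 PySem.Dict.empty, PySem.Dict.get?_empty]
        simp [Option.orElse]
      have hcond : ((pvFirstPass full).getD (normalize_text x) 0 < (pre.length : Int))
          ↔ normalize_text x ∈ pre.map normalize_text := by
        rw [hget, hfull]
        have := pvFirstIdx_lt_iff x xs pre 0
        simpa using this
      have htail : (PySem.List.enumerate xs ((pre.length : Int) + 1)).filterMap (fun p =>
          if (pvFirstPass full).getD (normalize_text p.2) 0 < p.1 then some p.2 else none)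
          = pvDups (pre.map normalize_text ++ [normalize_text x]) xs := by
        have hlen : (pre.length : Int) + 1 = (((pre ++ [x]).length : Nat) : Int) := by
          simp [List.length_append]
        rw [hlen, ih (pre ++ [x]) (by simpa using hfull)]
        rw [List.map_append, List.map_singleton]
      by_cases hmem : normalize_text x ∈ pre.map normalize_text
      · simp only [if_pos (hcond.mpr hmem), pvDups, if_pos hmem, htail]
      · simp only [if_neg (fun h => hmem (hcond.mp h)), pvDups, if_neg hmem, htail]

-- ===== VERDICT (by name: the statement is the Claim_ definition above) =====
theorem validate_duplicate_traceability_items_spec : Claim_equal_validate_duplicate_traceability_items := by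
  intro data _
  unfold Spec_validate_duplicate_traceability_items
  have hA : validate_duplicate_traceability_items data
      = pvDups [] ((PySem.Dict.mk data).getD "traceability" []) := by
    unfold validate_duplicate_traceability_items
    rw [pvA_eq_dups _ [] PySem.Set.empty []
          (by intro m; simp [PySem.Set.empty])]
    simp
  have hB : validate_duplicate_traceability_items_alt data
      = pvDups [] ((PySem.Dict.mk data).getD "traceability" []) := by
    unfold validate_duplicate_traceability_items_alt
    simpa using pvB_eq_dups ((PySem.Dict.mk data).getD "traceability" [])
      ((PySem.Dict.mk data).getD "traceability" []) [] rfl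
  rw [hA, hB]
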